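-- pv_equiv track=rewrite | github.com/andrewaires/Exercicios-Beecrowd-Python | 01-Iniciante/2635 - Navegador Web.py | sugestoes
-- ===== SOURCE A (Python) =====
-- def sugestoes(palavras_pesquisadas, consultas):
--     resultado = []
--     for consulta in consultas:
--         sugestoes = []
--         max_comprimento = -1
--         for palavra in palavras_pesquisadas:
--             if palavra.startswith(consulta):
--                 sugestoes.append(palavra)
--                 max_comprimento = max(max_comprimento, len(palavra))
--         if sugestoes:
--             resultado.append((len(sugestoes), max_comprimento))
--         else:
--             resultado.append((-1, -1))
--     return resultado
-- ===== SOURCE B (Python) =====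
-- def _upd(index, p, n):
--     cnt, ml = index.get(p, (0, -1))
--     index[p] = (cnt + 1, ml if ml > n else n)
--
--
-- def sugestoes(palavras_pesquisadas, consultas):
--     # Build a prefix index once: for every prefix p of every word, store
--     # (number of words with prefix p, max length among them). Each query is
--     # then a single dict lookup instead of a scan over all words.
--     index = {}
--     for palavra in palavras_pesquisadas:
--         n = len(palavra)
--         p = ""
--         for ch in palavra:
--             _upd(index, p, n)
--             p += ch
--         _upd(index, p, n)
--     return [index.get(consulta, (-1, -1)) for consulta in consultas]
-- ===== Notes on version B (the rewrite author's own statement) =====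
-- stated objective: faster
-- what changed: B builds a prefix index (dict from every prefix of every word to its (count, max-length)) in one pass over the words, so each query is a single dict lookup instead of A's scan over all words per query.
import Mathlib
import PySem

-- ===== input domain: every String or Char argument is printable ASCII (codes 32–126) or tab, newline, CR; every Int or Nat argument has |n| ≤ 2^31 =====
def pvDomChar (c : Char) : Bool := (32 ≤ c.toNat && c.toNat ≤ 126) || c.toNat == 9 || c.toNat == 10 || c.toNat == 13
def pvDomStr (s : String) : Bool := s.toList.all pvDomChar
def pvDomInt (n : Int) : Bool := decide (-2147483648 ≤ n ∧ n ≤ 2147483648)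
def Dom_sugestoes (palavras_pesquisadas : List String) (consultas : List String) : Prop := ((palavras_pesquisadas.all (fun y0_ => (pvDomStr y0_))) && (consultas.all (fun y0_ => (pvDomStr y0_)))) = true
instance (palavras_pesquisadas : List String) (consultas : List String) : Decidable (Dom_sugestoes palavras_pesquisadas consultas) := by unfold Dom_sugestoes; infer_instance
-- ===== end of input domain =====

-- B replaces A's per-query scan over all words by a prefix index built once
-- (every prefix of every word ↦ (count, max length)); objective: faster.

-- ===== PORT A =====
def sugestoes (palavras_pesquisadas : List String) (consultas : List String) : List (Int × Int) :=
  consultas.foldl (fun resultado consulta =>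
    let st := palavras_pesquisadas.foldl
      (fun (s : List String × Int) palavra =>
        if PySem.Str.startswith palavra consulta then
          (s.1 ++ [palavra], max s.2 (PySem.Str.len palavra))
        else s) ([], -1)
    resultado ++ [if st.1 ≠ [] then ((st.1.length : Int), st.2) else (-1, -1)]) []

-- ===== PORT B =====
-- Dict keys are Python strings, represented (as everywhere in PySem) by their
-- code-point lists; 'p += ch' is 'p ++ [ch]'.
def pvUpd (index : PySem.Dict (List Char) (Int × Int)) (p : List Char) (n : Int) :
    PySem.Dict (List Char) (Int × Int) :=
  let cm := index.getD p (0, -1)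
  index.insert p (cm.1 + 1, if cm.2 > n then cm.2 else n)

def pvAddWord (index : PySem.Dict (List Char) (Int × Int)) (palavra : String) :
    PySem.Dict (List Char) (Int × Int) :=
  let n := PySem.Str.len palavra
  let st := palavra.toList.foldl
    (fun (s : PySem.Dict (List Char) (Int × Int) × List Char) ch =>
      (pvUpd s.1 s.2 n, s.2 ++ [ch])) (index, [])
  pvUpd st.1 st.2 n

def sugestoes_alt (palavras_pesquisadas : List String) (consultas : List String) : List (Int × Int) :=
  let index := palavras_pesquisadas.foldl (fun d palavra => pvAddWord d palavra) PySem.Dict.empty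
  consultas.map (fun consulta => index.getD consulta.toList (-1, -1))

-- ===== PRECONDITION & SPEC =====
def Spec_sugestoes (palavras_pesquisadas : List String) (consultas : List String) (out : List (Int × Int)) : Prop := out = sugestoes_alt palavras_pesquisadas consultas
instance (palavras_pesquisadas : List String) (consultas : List String) (out : List (Int × Int)) : Decidable (Spec_sugestoes palavras_pesquisadas consultas out) := by unfold Spec_sugestoes; infer_instance

-- ===== CLAIM (what is proved, stated in full; the proofs are below) =====
def Claim_equal_sugestoes : Prop := ∀ (palavras_pesquisadas : List String) (consultas : List String), Dom_sugestoes palavras_pesquisadas consultas → Spec_sugestoes palavras_pesquisadas consultas (sugestoes palavras_pesquisadas consultas)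

-- ===== LEMMAS AND PROOFS =====

-- the value pvUpd writes for a key holding cm, as a function
def pvBump (cm : Int × Int) (n : Int) : Int × Int := (cm.1 + 1, if cm.2 > n then cm.2 else n)

-- effect of one word's prefix loop on a single key c: touched exactly once iff
-- c lies between the starting prefix p and p ++ l
theorem get?_prefixFold (c : List Char) (n : Int) :
    ∀ (l p : List Char) (d : PySem.Dict (List Char) (Int × Int)),
    (pvUpd (l.foldl (fun s ch => (pvUpd s.1 s.2 n, s.2 ++ [ch])) (d, p)).1
           (l.foldl (fun s ch => (pvUpd s.1 s.2 n, s.2 ++ [ch])) (d, p)).2 n).get? c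
      = if p <+: c ∧ c <+: p ++ l then some (pvBump (d.getD c (0, -1)) n) else d.get? c := by
  intro l
  induction l with
  | nil =>
    intro p d
    simp only [List.foldl_nil, List.append_nil, pvUpd, pvBump]
    rw [PySem.Dict.get?_insert]
    by_cases h : c = p
    · subst h; simp
    · have : ¬ (p <+: c ∧ c <+: p) := by
        rintro ⟨h1, h2⟩
        exact h (h2.eq_of_length_le h1.length_le)
      simp [h, this]
  | cons ch l ih =>
    intro p d
    simp only [List.foldl_cons]
    rw [ih (p ++ [ch]) (pvUpd d p n)]
    by_cases hA : (p ++ [ch]) <+: c ∧ c <+: (p ++ [ch]) ++ l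
    · have hpc : p ≠ c := by
        rintro rfl
        have := hA.1.length_le
        simp at this
      have hcond : p <+: c ∧ c <+: p ++ ch :: l := by
        refine ⟨(List.prefix_append p [ch]).trans hA.1, ?_⟩
        simpa using hA.2
      have hgetD : (pvUpd d p n).getD c (0, -1) = d.getD c (0, -1) := by
        simp only [pvUpd, PySem.Dict.getD_insert]
        simp [Ne.symm hpc]
      simp [hA, hcond, hgetD]
    · rw [if_neg hA]
      simp only [pvUpd, pvBump]
      rw [PySem.Dict.get?_insert]
      by_cases h : c = p
      · subst h
        simp
      · have hcond : ¬ (p <+: c ∧ c <+: p ++ ch :: l) := by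
        -- c strictly extends p inside p ++ ch :: l, hence p ++ [ch] <+: c — contradicting hA
          rintro ⟨⟨t, rfl⟩, h2⟩
          have ht : t ≠ [] := by rintro rfl; simp at h
          have h2' : t <+: ch :: l := (List.prefix_append_right_inj p).mp h2
          obtain ⟨u, hu⟩ := h2'
          cases t with
          | nil => exact ht rfl
          | cons t0 ts =>
            rw [List.cons_append] at hu
            injection hu with ht0 hl
            subst ht0
            exact hA ⟨⟨ts, by simp⟩, by simpa using h2⟩
        simp [h, hcond]

theorem get?_addWord (d : PySem.Dict (List Char) (Int × Int)) (w : String) (c : List Char) :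
    (pvAddWord d w).get? c
      = if c <+: w.toList then some (pvBump (d.getD c (0, -1)) (PySem.Str.len w)) else d.get? c := by
  simpa using get?_prefixFold c (PySem.Str.len w) w.toList [] d

-- one-key view of the whole index build
theorem get?_build (c : List Char) :
    ∀ (ws : List String) (d : PySem.Dict (List Char) (Int × Int)),
    (ws.foldl (fun d w => pvAddWord d w) d).get? c
      = ws.foldl (fun o w => if c <+: w.toList then some (pvBump (o.getD (0, -1)) (PySem.Str.len w)) else o)
          (d.get? c) := by
  intro ws
  induction ws with
  | nil => intro d; simp
  | cons w ws ih =>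
    intro d
    simp only [List.foldl_cons]
    rw [ih, get?_addWord, PySem.Dict.getD_eq_get?_getD]

-- invariant tying A's inner accumulator (matches list, running max) to B's per-key option
def pvRel (lst : List String) (m : Int) (o : Option (Int × Int)) : Prop :=
  match o with
  | none => lst = [] ∧ m = -1
  | some cm => lst ≠ [] ∧ cm = ((lst.length : Int), m)

theorem pvRel_fold (c : String) :
    ∀ (ws : List String) (lst : List String) (m : Int) (o : Option (Int × Int)), pvRel lst m o →
    pvRel (ws.foldl (fun (s : List String × Int) w =>
             if PySem.Str.startswith w c then (s.1 ++ [w], max s.2 (PySem.Str.len w)) else s) (lst, m)).1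
          (ws.foldl (fun (s : List String × Int) w =>
             if PySem.Str.startswith w c then (s.1 ++ [w], max s.2 (PySem.Str.len w)) else s) (lst, m)).2
          (ws.foldl (fun o w =>
             if c.toList <+: w.toList then some (pvBump (o.getD (0, -1)) (PySem.Str.len w)) else o) o) := by
  intro ws
  induction ws with
  | nil => intro lst m o h; exact h
  | cons w ws ih =>
    intro lst m o h
    simp only [List.foldl_cons]
    have hsw : PySem.Str.startswith w c = c.toList.isPrefixOf w.toList := rfl
    have hmax : ∀ a b : Int, (if a > b then a else b) = max a b := by
      intro a b; rw [max_def]; split_ifs <;> omega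
    by_cases hp : c.toList <+: w.toList
    · have hb : PySem.Str.startswith w c = true := by
        rw [hsw]; exact List.isPrefixOf_iff_prefix.mpr hp
      rw [if_pos hb, if_pos hp]
      apply ih
      cases o with
      | none =>
        obtain ⟨h1, h2⟩ := h
        subst h1; subst h2
        refine ⟨by simp, ?_⟩
        simp [pvBump, hmax]
      | some cm =>
        obtain ⟨h1, h2⟩ := h
        subst h2
        refine ⟨by simp, ?_⟩
        simp only [pvBump, Option.getD_some, hmax, Prod.mk.injEq, List.length_append]
        refine ⟨by simp, trivial⟩
    · have hb : PySem.Str.startswith w c = false := by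
        rw [hsw]
        cases hcase : c.toList.isPrefixOf w.toList with
        | true => exact absurd (List.isPrefixOf_iff_prefix.mp hcase) hp
        | false => rfl
      rw [if_neg (by rw [hb]; simp), if_neg hp]
      exact ih lst m o h

-- ===== VERDICT (by name: the statement is the Claim_ definition above) =====
theorem sugestoes_spec : Claim_equal_sugestoes := by
  intro ws cs _
  unfold Spec_sugestoes sugestoes sugestoes_alt
  rw [PySem.List.foldl_append_singleton_eq_map, List.nil_append]
  apply List.map_congr_left
  intro c _
  dsimp only
  rw [PySem.Dict.getD_eq_get?_getD, get?_build, PySem.Dict.get?_empty]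
  have h := pvRel_fold c ws [] (-1) none ⟨rfl, rfl⟩
  revert h
  cases hfold : ws.foldl (fun o w =>
      if c.toList <+: w.toList then some (pvBump (o.getD (0, -1)) (PySem.Str.len w)) else o) none with
  | none =>
    rintro ⟨h1, -⟩
    rw [Option.getD_none, if_neg (by simpa using h1)]
  | some cm =>
    rintro ⟨h1, h2⟩
    rw [Option.getD_some, if_pos (by simpa using h1), h2]
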